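-- pv_equiv track=rewrite | github.com/Oichkatzelesfrettschen/Synthesis-Dark-Theme | src/scripts/vectorize_assets.py | mimetype_alias_pairs
-- ===== SOURCE A (Python) =====
-- def office_family_aliases(stem: str) -> list[tuple[str, str]]:
--     """Collapse office-related MIME stems onto canonical office icons."""
--     if any(token in stem for token in ('spreadsheet', 'excel', 'calc', 'lotus-1-2-3', 'kspread', 'gnumeric', 'applix-spreadsheet')):
--         return [('mimetypes', 'x-office-spreadsheet')]
--     if any(token in stem for token in ('presentation', 'powerpoint', 'impress', 'magicpoint', 'kpresenter')):
--         return [('mimetypes', 'x-office-presentation')]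
--     if any(token in stem for token in ('drawing', 'draw', 'graphics')):
--         return [('mimetypes', 'x-office-drawing')]
--     if any(token in stem for token in ('address-book', 'vcard')):
--         return [('mimetypes', 'x-office-address-book')]
--     if any(token in stem for token in ('calendar', 'planner')):
--         return [('mimetypes', 'x-office-calendar')]
--     if any(token in stem for token in (
--         'document',
--         'word',
--         'writer',
--         'wordprocessing',
--         'text',
--         'rtf',
--         'postscript',
--         'pdf',
--         'msword',
--         'wordperfect',
--         'abiword',
--         'kword',
--         'applix-word',
--     )):
--         return [('mimetypes', 'x-office-document')]
--     return []
--
-- def mimetype_alias_pairs(stem: str) -> list[tuple[str, str]]: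
--     """Return rule-derived aliases for legacy or family MIME icon names."""
--     pairs = []
--     gnome_prefix = 'gnome-mime-'
--     if stem.startswith(gnome_prefix):
--         stripped = stem[len(gnome_prefix):]
--         pairs.append(('mimetypes', stripped))
--         if stripped != stem:
--             pairs.extend(mimetype_alias_pairs(stripped))
--
--     pairs.extend(office_family_aliases(stem))
--
--     if stem.startswith('openofficeorg-') or stem.startswith('openofficeorg3-'):
--         pairs.extend(office_family_aliases(stem.split('-', 1)[1]))
--
--     office_prefixes = (
--         'application-vnd.openxmlformats-officedocument.',
--         'application-vnd.ms-',
--         'application-vnd.oasis.opendocument.',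
--         'application-vnd.stardivision.',
--         'application-vnd.sun.xml.',
--     )
--     if any(stem.startswith(prefix) for prefix in office_prefixes):
--         pairs.extend(office_family_aliases(stem))
--
--     if any(token in stem for token in ('7z', 'zip', 'stuffit', 'lha', 'lhz', 'lzma', 'cpio', 'compress')):
--         pairs.append(('mimetypes', 'application-x-archive'))
--     if any(token in stem for token in ('realmedia', 'video', 'flash')):
--         pairs.append(('mimetypes', 'video-x-generic'))
--     if any(token in stem for token in ('font', 'afm', 'ttf', 'pcf', 'psf', 'bdf')):
--         pairs.append(('mimetypes', 'font-x-generic'))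
--     if 'xhtml+xml' in stem:
--         pairs.append(('mimetypes', 'text-html'))
--     if any(token in stem for token in ('tex', 'dvi')):
--         pairs.append(('mimetypes', 'text-x-tex'))
--     if 'zsh' in stem:
--         pairs.append(('mimetypes', 'application-x-shellscript'))
--     if 'xcf' in stem:
--         pairs.append(('mimetypes', 'image-x-compressed-xcf'))
--     if 'scribus' in stem:
--         pairs.append(('apps', 'scribus'))
--     if 'desktop' in stem:
--         pairs.append(('places', 'user-desktop'))
--
--     return pairs
-- ===== SOURCE B (Python) =====
-- # B: rule tables encoded as whitespace-separated token strings split once at module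
-- # load, family lookup is a first-match scan of the table, and the gnome-mime-
-- # recursion is flattened into an iterative strip chain with two emission phases.
--
-- _GNOME = 'gnome-mime-'
--
-- _FAMILY = [(toks.split(), icon) for toks, icon in [
--     ('spreadsheet excel calc lotus-1-2-3 kspread gnumeric applix-spreadsheet',
--      'x-office-spreadsheet'),
--     ('presentation powerpoint impress magicpoint kpresenter',
--      'x-office-presentation'),
--     ('drawing draw graphics', 'x-office-drawing'),
--     ('address-book vcard', 'x-office-address-book'),
--     ('calendar planner', 'x-office-calendar'),
--     ('document word writer wordprocessing text rtf postscript pdf msword '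
--      'wordperfect abiword kword applix-word', 'x-office-document'),
-- ]]
--
-- _OFFICE_PREFIXES = (
--     'application-vnd.openxmlformats-officedocument. '
--     'application-vnd.ms- '
--     'application-vnd.oasis.opendocument. '
--     'application-vnd.stardivision. '
--     'application-vnd.sun.xml.'
-- ).split()
--
-- _RULES = [(toks.split(), cat, icon) for toks, cat, icon in [
--     ('7z zip stuffit lha lhz lzma cpio compress', 'mimetypes', 'application-x-archive'),
--     ('realmedia video flash', 'mimetypes', 'video-x-generic'),
--     ('font afm ttf pcf psf bdf', 'mimetypes', 'font-x-generic'),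
--     ('xhtml+xml', 'mimetypes', 'text-html'),
--     ('tex dvi', 'mimetypes', 'text-x-tex'),
--     ('zsh', 'mimetypes', 'application-x-shellscript'),
--     ('xcf', 'mimetypes', 'image-x-compressed-xcf'),
--     ('scribus', 'apps', 'scribus'),
--     ('desktop', 'places', 'user-desktop'),
-- ]]
--
--
-- def _family(name):
--     """First matching office family as alias pairs (first-match table scan)."""
--     for tokens, icon in _FAMILY:
--         if any(token in name for token in tokens):
--             return [('mimetypes', icon)]
--     return []
--
--
-- def _single_level(name):
--     """All non-prefix-stripping rules for one name, in emission order."""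
--     out = list(_family(name))
--     if name.startswith('openofficeorg-') or name.startswith('openofficeorg3-'):
--         out += _family(name.split('-', 1)[1])
--     if name.startswith(tuple(_OFFICE_PREFIXES)):
--         out += _family(name)
--     for tokens, cat, icon in _RULES:
--         if any(token in name for token in tokens):
--             out.append((cat, icon))
--     return out
--
--
-- def mimetype_alias_pairs(stem: str) -> list[tuple[str, str]]:
--     """Return rule-derived aliases for legacy or family MIME icon names."""
--     names = [stem]
--     while names[-1].startswith(_GNOME):
--         names.append(names[-1][len(_GNOME):])
--     pairs = [('mimetypes', n) for n in names[1:]]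
--     for name in names[::-1]:
--         pairs += _single_level(name)
--     return pairs
-- ===== Notes on version B (the rewrite author's own statement) =====
-- stated objective: alternative
-- what changed: Replaces A's recursion on the legacy gnome prefix by an iterative strip-chain loop with two ordered emission phases (markers forward, per-level rules deepest-first), and replaces the hard-coded if-chains by rule tables encoded as whitespace-separated token strings split once at load time.
import Mathlib
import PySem

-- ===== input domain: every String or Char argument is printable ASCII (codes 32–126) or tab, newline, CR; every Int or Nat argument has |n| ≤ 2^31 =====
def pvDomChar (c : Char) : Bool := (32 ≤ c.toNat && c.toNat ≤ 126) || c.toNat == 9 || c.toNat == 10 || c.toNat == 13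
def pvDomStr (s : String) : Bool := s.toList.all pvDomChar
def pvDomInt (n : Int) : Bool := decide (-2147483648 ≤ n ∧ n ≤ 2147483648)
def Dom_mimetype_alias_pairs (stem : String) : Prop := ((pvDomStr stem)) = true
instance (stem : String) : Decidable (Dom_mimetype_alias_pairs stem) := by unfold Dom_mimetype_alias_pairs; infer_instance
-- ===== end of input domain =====

-- B flattens A's recursion on the legacy gnome prefix into an iterative strip chain with two
-- emission phases, with the rule tables encoded as split token strings (objective: alternative).

-- ===== PORT A =====

def pvGP : List Char := "gnome-mime-".toList

-- office_family_aliases, transliterated branch by branch ('token in stem' = Chars.isIn)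
def office_family_aliases (s : List Char) : List (String × String) :=
  if (["spreadsheet".toList, "excel".toList, "calc".toList, "lotus-1-2-3".toList, "kspread".toList,
       "gnumeric".toList, "applix-spreadsheet".toList]).any (fun t => PySem.Chars.isIn t s) then
    [("mimetypes", "x-office-spreadsheet")]
  else if (["presentation".toList, "powerpoint".toList, "impress".toList, "magicpoint".toList,
       "kpresenter".toList]).any (fun t => PySem.Chars.isIn t s) then
    [("mimetypes", "x-office-presentation")]
  else if (["drawing".toList, "draw".toList, "graphics".toList]).any (fun t => PySem.Chars.isIn t s) then
    [("mimetypes", "x-office-drawing")]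
  else if (["address-book".toList, "vcard".toList]).any (fun t => PySem.Chars.isIn t s) then
    [("mimetypes", "x-office-address-book")]
  else if (["calendar".toList, "planner".toList]).any (fun t => PySem.Chars.isIn t s) then
    [("mimetypes", "x-office-calendar")]
  else if (["document".toList, "word".toList, "writer".toList, "wordprocessing".toList, "text".toList,
       "rtf".toList, "postscript".toList, "pdf".toList, "msword".toList, "wordperfect".toList,
       "abiword".toList, "kword".toList, "applix-word".toList]).any (fun t => PySem.Chars.isIn t s) then
    [("mimetypes", "x-office-document")]
  else []

-- termination helper for the gnome-mime- strip: the slice is strictly shorter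
theorem pvStrip_lt (s : List Char) (h : PySem.Chars.startswith s pvGP = true) :
    (PySem.List.slice s (some 11) none).length < s.length := by
  have hp := (PySem.Chars.startswith_iff s pvGP).mp h
  have h11 : 11 ≤ s.length := by
    have := hp.length_le
    have hgp : pvGP.length = 11 := by decide
    omega
  rw [PySem.List.slice_from s (by norm_num)]
  simp
  omega

-- office_family_aliases(stem.split('-', 1)[1]) — the index exists whenever the caller's guard holds
def pvSplitOfaA (s : List Char) : List (String × String) :=
  match PySem.List.pyGet? (PySem.Chars.splitOnMax s "-".toList 1) 1 with
  | some t => office_family_aliases t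
  | none => []

-- mimetype_alias_pairs, transliterated: pairs is built by appends in the original order
-- (stem[len(gnome_prefix):] = slice from 11)
def pvMtapA (s : List Char) : List (String × String) :=
  (if h : PySem.Chars.startswith s pvGP then
     let stripped := PySem.List.slice s (some 11) none
     ("mimetypes", String.ofList stripped) :: (if stripped ≠ s then pvMtapA stripped else [])
   else [])
  ++ office_family_aliases s
  ++ (if PySem.Chars.startswith s "openofficeorg-".toList || PySem.Chars.startswith s "openofficeorg3-".toList then
        pvSplitOfaA s else [])
  ++ (if (["application-vnd.openxmlformats-officedocument.".toList, "application-vnd.ms-".toList,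
           "application-vnd.oasis.opendocument.".toList, "application-vnd.stardivision.".toList,
           "application-vnd.sun.xml.".toList]).any (fun p => PySem.Chars.startswith s p) then
        office_family_aliases s else [])
  ++ (if (["7z".toList, "zip".toList, "stuffit".toList, "lha".toList, "lhz".toList, "lzma".toList,
           "cpio".toList, "compress".toList]).any (fun t => PySem.Chars.isIn t s) then
        [("mimetypes", "application-x-archive")] else [])
  ++ (if (["realmedia".toList, "video".toList, "flash".toList]).any (fun t => PySem.Chars.isIn t s) then
        [("mimetypes", "video-x-generic")] else [])
  ++ (if (["font".toList, "afm".toList, "ttf".toList, "pcf".toList, "psf".toList, "bdf".toList]).any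
          (fun t => PySem.Chars.isIn t s) then
        [("mimetypes", "font-x-generic")] else [])
  ++ (if PySem.Chars.isIn "xhtml+xml".toList s then [("mimetypes", "text-html")] else [])
  ++ (if (["tex".toList, "dvi".toList]).any (fun t => PySem.Chars.isIn t s) then
        [("mimetypes", "text-x-tex")] else [])
  ++ (if PySem.Chars.isIn "zsh".toList s then [("mimetypes", "application-x-shellscript")] else [])
  ++ (if PySem.Chars.isIn "xcf".toList s then [("mimetypes", "image-x-compressed-xcf")] else [])
  ++ (if PySem.Chars.isIn "scribus".toList s then [("apps", "scribus")] else [])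
  ++ (if PySem.Chars.isIn "desktop".toList s then [("places", "user-desktop")] else [])
termination_by s.length
decreasing_by exact pvStrip_lt s h

def mimetype_alias_pairs (stem : String) : List (String × String) := pvMtapA stem.toList

-- ===== PORT B =====

-- _FAMILY of Source B: token strings split once (str.split() = PySem.Chars.split₀)
def pvFamTable : List (List (List Char) × String) :=
  [("spreadsheet excel calc lotus-1-2-3 kspread gnumeric applix-spreadsheet", "x-office-spreadsheet"),
   ("presentation powerpoint impress magicpoint kpresenter", "x-office-presentation"),
   ("drawing draw graphics", "x-office-drawing"),
   ("address-book vcard", "x-office-address-book"),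
   ("calendar planner", "x-office-calendar"),
   ("document word writer wordprocessing text rtf postscript pdf msword wordperfect abiword kword applix-word",
    "x-office-document")].map (fun r => (PySem.Chars.split₀ r.1.toList, r.2))

-- _OFFICE_PREFIXES of Source B
def pvOffPrefixes : List (List Char) :=
  PySem.Chars.split₀ ("application-vnd.openxmlformats-officedocument. application-vnd.ms- application-vnd.oasis.opendocument. application-vnd.stardivision. application-vnd.sun.xml.").toList

-- _RULES of Source B
def pvRuleTable : List (List (List Char) × String × String) :=
  [("7z zip stuffit lha lhz lzma cpio compress", "mimetypes", "application-x-archive"),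
   ("realmedia video flash", "mimetypes", "video-x-generic"),
   ("font afm ttf pcf psf bdf", "mimetypes", "font-x-generic"),
   ("xhtml+xml", "mimetypes", "text-html"),
   ("tex dvi", "mimetypes", "text-x-tex"),
   ("zsh", "mimetypes", "application-x-shellscript"),
   ("xcf", "mimetypes", "image-x-compressed-xcf"),
   ("scribus", "apps", "scribus"),
   ("desktop", "places", "user-desktop")].map
    (fun r => (PySem.Chars.split₀ r.1.toList, r.2.1, r.2.2))

-- _family's for-loop with early return, as structural recursion over the table
def pvFamilyFind : List (List (List Char) × String) → List Char → List (String × String)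
  | [], _ => []
  | (toks, icon) :: rest, s =>
    if toks.any (fun t => PySem.Chars.isIn t s) then [("mimetypes", icon)] else pvFamilyFind rest s

def pvFamily (s : List Char) : List (String × String) := pvFamilyFind pvFamTable s

-- _family(name.split('-', 1)[1]) — the index exists whenever the caller's guard holds
def pvSplitFamily (s : List Char) : List (String × String) :=
  match PySem.List.pyGet? (PySem.Chars.splitOnMax s "-".toList 1) 1 with
  | some t => pvFamily t
  | none => []

-- _single_level of Source B
def pvSingleLevel (s : List Char) : List (String × String) :=
  let out := pvFamily s
  let out := if PySem.Chars.startswith s "openofficeorg-".toList || PySem.Chars.startswith s "openofficeorg3-".toList then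
      out ++ pvSplitFamily s
    else out
  let out := if pvOffPrefixes.any (fun p => PySem.Chars.startswith s p) then
      out ++ pvFamily s
    else out
  pvRuleTable.foldl
    (fun acc r => if r.1.any (fun t => PySem.Chars.isIn t s) then acc ++ [(r.2.1, r.2.2)] else acc) out

def pvGnome : List Char := "gnome-mime-".toList

-- termination helper for B's while-loop (the slice is strictly shorter)
theorem pvStrip_lt_b (s : List Char) (h : PySem.Chars.startswith s pvGnome = true) :
    (PySem.List.slice s (some 11) none).length < s.length := by
  have hp := (PySem.Chars.startswith_iff s pvGnome).mp h
  have h11 : 11 ≤ s.length := by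
    have := hp.length_le
    have hgp : pvGnome.length = 11 := by decide
    omega
  rw [PySem.List.slice_from s (by norm_num)]
  simp
  omega

-- the while-loop collecting names[1:] (each stripped name, outermost first)
def pvStripChain (s : List Char) : List (List Char) :=
  if h : PySem.Chars.startswith s pvGnome then
    let cur := PySem.List.slice s (some 11) none
    cur :: pvStripChain cur
  else []
termination_by s.length
decreasing_by exact pvStrip_lt_b s h

def mimetype_alias_pairs_alt (stem : String) : List (String × String) :=
  let chain := pvStripChain stem.toList
  (([stem.toList] ++ chain).reverse).foldl
    (fun acc n => acc ++ pvSingleLevel n)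
    (chain.map (fun c => ("mimetypes", String.ofList c)))

-- ===== PRECONDITION & SPEC =====
def Spec_mimetype_alias_pairs (stem : String) (out : List (String × String)) : Prop := out = mimetype_alias_pairs_alt stem
instance (stem : String) (out : List (String × String)) : Decidable (Spec_mimetype_alias_pairs stem out) := by unfold Spec_mimetype_alias_pairs; infer_instance

-- ===== CLAIM (what is proved, stated in full; the proofs are below) =====
def Claim_equal_mimetype_alias_pairs : Prop := ∀ (stem : String), Dom_mimetype_alias_pairs stem → Spec_mimetype_alias_pairs stem (mimetype_alias_pairs stem)

-- ===== LEMMAS AND PROOFS =====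

-- the split token strings evaluate to the literal token lists
set_option maxRecDepth 10000 in
theorem pvFamTable_eq : pvFamTable =
    [(["spreadsheet".toList, "excel".toList, "calc".toList, "lotus-1-2-3".toList, "kspread".toList,
       "gnumeric".toList, "applix-spreadsheet".toList], "x-office-spreadsheet"),
     (["presentation".toList, "powerpoint".toList, "impress".toList, "magicpoint".toList,
       "kpresenter".toList], "x-office-presentation"),
     (["drawing".toList, "draw".toList, "graphics".toList], "x-office-drawing"),
     (["address-book".toList, "vcard".toList], "x-office-address-book"),
     (["calendar".toList, "planner".toList], "x-office-calendar"),
     (["document".toList, "word".toList, "writer".toList, "wordprocessing".toList, "text".toList,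
       "rtf".toList, "postscript".toList, "pdf".toList, "msword".toList, "wordperfect".toList,
       "abiword".toList, "kword".toList, "applix-word".toList], "x-office-document")] := by decide

set_option maxRecDepth 10000 in
theorem pvOffPrefixes_eq : pvOffPrefixes =
    ["application-vnd.openxmlformats-officedocument.".toList, "application-vnd.ms-".toList,
     "application-vnd.oasis.opendocument.".toList, "application-vnd.stardivision.".toList,
     "application-vnd.sun.xml.".toList] := by decide

set_option maxRecDepth 10000 in
theorem pvRuleTable_eq : pvRuleTable =
    [(["7z".toList, "zip".toList, "stuffit".toList, "lha".toList, "lhz".toList, "lzma".toList,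
       "cpio".toList, "compress".toList], "mimetypes", "application-x-archive"),
     (["realmedia".toList, "video".toList, "flash".toList], "mimetypes", "video-x-generic"),
     (["font".toList, "afm".toList, "ttf".toList, "pcf".toList, "psf".toList, "bdf".toList],
       "mimetypes", "font-x-generic"),
     (["xhtml+xml".toList], "mimetypes", "text-html"),
     (["tex".toList, "dvi".toList], "mimetypes", "text-x-tex"),
     (["zsh".toList], "mimetypes", "application-x-shellscript"),
     (["xcf".toList], "mimetypes", "image-x-compressed-xcf"),
     (["scribus".toList], "apps", "scribus"),
     (["desktop".toList], "places", "user-desktop")] := by decide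

-- the table-driven family lookup is A's if-chain
theorem pvFamily_eq (s : List Char) : pvFamily s = office_family_aliases s := by
  rw [pvFamily, pvFamTable_eq]
  simp only [pvFamilyFind, office_family_aliases]

theorem pvPull_ite {α : Type} (b : Bool) (acc x : List α) :
    (if b then acc ++ x else acc) = acc ++ (if b then x else []) := by
  cases b <;> simp

-- Source B's single-level rules equal the tail of A's body (everything after the prefix block)
theorem pvSingleLevel_eq (s : List Char) :
    pvSingleLevel s =
      office_family_aliases s
      ++ (if PySem.Chars.startswith s "openofficeorg-".toList || PySem.Chars.startswith s "openofficeorg3-".toList then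
        pvSplitOfaA s else [])
  ++ (if (["application-vnd.openxmlformats-officedocument.".toList, "application-vnd.ms-".toList,
           "application-vnd.oasis.opendocument.".toList, "application-vnd.stardivision.".toList,
           "application-vnd.sun.xml.".toList]).any (fun p => PySem.Chars.startswith s p) then
        office_family_aliases s else [])
  ++ (if (["7z".toList, "zip".toList, "stuffit".toList, "lha".toList, "lhz".toList, "lzma".toList,
           "cpio".toList, "compress".toList]).any (fun t => PySem.Chars.isIn t s) then
        [("mimetypes", "application-x-archive")] else [])
  ++ (if (["realmedia".toList, "video".toList, "flash".toList]).any (fun t => PySem.Chars.isIn t s) then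
        [("mimetypes", "video-x-generic")] else [])
  ++ (if (["font".toList, "afm".toList, "ttf".toList, "pcf".toList, "psf".toList, "bdf".toList]).any
          (fun t => PySem.Chars.isIn t s) then
        [("mimetypes", "font-x-generic")] else [])
  ++ (if PySem.Chars.isIn "xhtml+xml".toList s then [("mimetypes", "text-html")] else [])
  ++ (if (["tex".toList, "dvi".toList]).any (fun t => PySem.Chars.isIn t s) then
        [("mimetypes", "text-x-tex")] else [])
  ++ (if PySem.Chars.isIn "zsh".toList s then [("mimetypes", "application-x-shellscript")] else [])
  ++ (if PySem.Chars.isIn "xcf".toList s then [("mimetypes", "image-x-compressed-xcf")] else [])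
  ++ (if PySem.Chars.isIn "scribus".toList s then [("apps", "scribus")] else [])
  ++ (if PySem.Chars.isIn "desktop".toList s then [("places", "user-desktop")] else [])
  := by
  simp only [pvSingleLevel, pvOffPrefixes_eq, pvRuleTable_eq]
  rw [PySem.List.foldl_congr_mem _ _
        (fun acc r => acc ++ (if r.1.any (fun t => PySem.Chars.isIn t s) then [(r.2.1, r.2.2)] else [])) _
        (fun acc x _ => pvPull_ite _ _ _)]
  rw [PySem.List.foldl_append_eq_flatMap]
  simp only [pvPull_ite]
  have hm : pvSplitFamily s = pvSplitOfaA s := by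
    unfold pvSplitFamily pvSplitOfaA
    rcases PySem.List.pyGet? (PySem.Chars.splitOnMax s "-".toList 1) 1 with _ | t
    · rfl
    · exact pvFamily_eq t
  rw [hm, pvFamily_eq]
  simp only [List.flatMap_cons, List.flatMap_nil, List.append_nil,
    List.any_cons, List.any_nil, Bool.or_false, List.append_assoc]

-- main invariant: A's recursion = markers of the strip chain, then the single-level
-- rules of each chain element deepest-first, then of the stem itself
theorem pvMtapA_eq (s : List Char) :
    pvMtapA s = (pvStripChain s).map (fun c => ("mimetypes", String.ofList c))
      ++ ((s :: pvStripChain s).reverse).flatMap pvSingleLevel := by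
  suffices H : ∀ (n : Nat) (s : List Char), s.length = n →
      pvMtapA s = (pvStripChain s).map (fun c => ("mimetypes", String.ofList c))
        ++ ((s :: pvStripChain s).reverse).flatMap pvSingleLevel from H s.length s rfl
  intro n
  induction n using Nat.strong_induction_on with
  | _ n ih =>
    intro s hs
    rw [pvMtapA, pvStripChain]
    have ht := pvSingleLevel_eq s
    simp only [List.append_assoc] at ht
    by_cases h : PySem.Chars.startswith s pvGP
    · have h2 : PySem.Chars.startswith s pvGnome = true := h
      rw [dif_pos h, dif_pos h2]
      have hlt := pvStrip_lt s h
      have hne : PySem.List.slice s (some 11) none ≠ s := by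
        intro he; rw [he] at hlt; omega
      simp only [List.cons_append, List.append_assoc, List.nil_append]
      rw [if_pos hne]
      rw [ih (PySem.List.slice s (some 11) none).length (by omega) _ rfl]
      simp only [List.cons_append, List.append_assoc, List.nil_append]
      rw [← ht]
      simp [List.reverse_cons, List.flatMap_append, List.append_assoc]
    · have h2 : ¬ PySem.Chars.startswith s pvGnome = true := h
      rw [dif_neg h, dif_neg h2]
      simp only [List.nil_append, List.append_assoc]
      rw [← ht]
      simp

-- ===== VERDICT (by name: the statement is the Claim_ definition above) =====
theorem mimetype_alias_pairs_spec : Claim_equal_mimetype_alias_pairs := by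
  intro stem _
  unfold Spec_mimetype_alias_pairs mimetype_alias_pairs mimetype_alias_pairs_alt
  rw [PySem.List.foldl_append_eq_flatMap, pvMtapA_eq]
  simp
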